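-- pv_equiv track=rewrite | github.com/suhasranaganath/SemiSupervisedLearning | src/atlm/annotator.py | process_text_with_annotations
-- ===== SOURCE A (Python) =====
-- def remove_conflicting_annotations(annotation_list):
--     sorted_annotations = sorted(annotation_list, key=lambda x: x[1]) # sorting by 2nd element
--     new_list = []
--     n = len(sorted_annotations)
--     if n <= 1:
--         return list(sorted_annotations)
--
--     for i in range(1,n):
--         s1,e1, t1, v1 = sorted_annotations[i-1]
--         s2,e2, t2, v2 = sorted_annotations[i]
--         if e1 <= s2:
--             new_list.append(sorted_annotations[i-1])
--     new_list.append(sorted_annotations[n-1])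
--     return new_list
--
-- def process_text_with_annotations(text, annotations, keep_tag_annotations):
--     annotations = remove_conflicting_annotations(annotations)
--     text_segments = []
--     sorted_annotations = sorted(annotations, key=lambda x: x[1]) # sorting by 2nd element
--     index = 0
--
--     for i in range(len(annotations)):
--         (start, end, ne_type, ne_val) = sorted_annotations[i]
--         if index < start:
--             text_segments.append(text[index:start])
--         if ne_type in keep_tag_annotations:
--             text_segments.append('<' + ne_type + '> ' + ne_val + ' </' + ne_type + '>' )
--         index = end
--     text_segments.append(text[index:len(text)])
--     return ' '.join(text_segments)
-- ===== SOURCE B (Python) =====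
-- def process_text_with_annotations(text, annotations, keep_tag_annotations):
--     anns = sorted(annotations, key=lambda x: x[1])
--     rev = []          # output pieces, collected right-to-left
--     pending = None    # start of the nearest kept annotation to the right
--     nxt_start = None  # start of the annotation immediately to the right
--     for start, end, ne_type, ne_val in reversed(anns):
--         if nxt_start is None or end <= nxt_start:   # kept
--             if pending is None:
--                 rev.append(text[end:])
--             elif end < pending:
--                 rev.append(text[end:pending])
--             if ne_type in keep_tag_annotations:
--                 rev.append('<' + ne_type + '> ' + ne_val + ' </' + ne_type + '>')
--             pending = start
--         nxt_start = start
--     if pending is None: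
--         rev.append(text[0:])
--     elif 0 < pending:
--         rev.append(text[0:pending])
--     return ' '.join(reversed(rev))
-- ===== Notes on version B (the rewrite author's own statement) =====
-- stated objective: alternative
-- what changed: B traverses the sorted annotations once from RIGHT to LEFT, deciding keep/drop from the previously visited start and emitting each gap/tag piece in reverse order into a list that is reversed once at the end, instead of A's filter helper + second sort + left-to-right build with a running index.
import Mathlib
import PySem

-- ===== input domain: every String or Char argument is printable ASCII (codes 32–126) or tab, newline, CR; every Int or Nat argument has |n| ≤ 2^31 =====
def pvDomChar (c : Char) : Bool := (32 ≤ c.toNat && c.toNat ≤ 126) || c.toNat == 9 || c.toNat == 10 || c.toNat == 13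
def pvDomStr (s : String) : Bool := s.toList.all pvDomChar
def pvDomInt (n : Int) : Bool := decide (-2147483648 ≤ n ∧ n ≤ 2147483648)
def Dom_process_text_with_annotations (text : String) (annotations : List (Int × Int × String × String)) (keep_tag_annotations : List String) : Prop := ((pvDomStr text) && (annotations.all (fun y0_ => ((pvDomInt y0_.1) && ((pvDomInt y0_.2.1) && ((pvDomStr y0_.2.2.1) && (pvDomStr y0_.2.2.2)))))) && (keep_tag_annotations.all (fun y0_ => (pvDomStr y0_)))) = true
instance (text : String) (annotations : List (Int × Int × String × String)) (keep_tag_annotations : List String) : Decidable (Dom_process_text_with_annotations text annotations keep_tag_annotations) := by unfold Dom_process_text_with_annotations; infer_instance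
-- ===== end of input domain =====

-- B replaces A's filter helper + second sort + left-to-right build by ONE reverse
-- (right-to-left) pass that emits the pieces back-to-front and reverses once at the
-- end (objective: alternative). Equivalence is proved for all inputs (no Pre_).

-- ===== PORT A =====
-- xs[i] for an index the Python loop keeps in range
def pvNth (xs : List (Int × Int × String × String)) (i : Int) : Int × Int × String × String :=
  PySem.List.pyGetD xs i (0, 0, "", "")

def remove_conflicting_annotations (annotation_list : List (Int × Int × String × String)) : List (Int × Int × String × String) :=
  let sorted_annotations := PySem.List.sorted annotation_list (fun x => x.2.1) false
  let n : Int := sorted_annotations.length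
  if n ≤ 1 then sorted_annotations
  else
    let new_list := (PySem.List.pyRange 1 n 1).foldl (fun acc i =>
      let a1 := pvNth sorted_annotations (i - 1)
      let a2 := pvNth sorted_annotations i
      if a1.2.1 ≤ a2.1 then acc ++ [pvNth sorted_annotations (i - 1)] else acc) []
    new_list ++ [pvNth sorted_annotations (n - 1)]

def process_text_with_annotations (text : String) (annotations : List (Int × Int × String × String)) (keep_tag_annotations : List String) : String :=
  let annotations := remove_conflicting_annotations annotations
  let sorted_annotations := PySem.List.sorted annotations (fun x => x.2.1) false
  let st := (PySem.List.pyRange 0 (annotations.length : Int) 1).foldl (fun (st : List String × Int) i =>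
      let a := pvNth sorted_annotations i
      let segs := if st.2 < a.1 then st.1 ++ [PySem.Str.slice text (some st.2) (some a.1)] else st.1
      let segs := if keep_tag_annotations.contains a.2.2.1 then
          segs ++ ["<" ++ a.2.2.1 ++ "> " ++ a.2.2.2 ++ " </" ++ a.2.2.1 ++ ">"] else segs
      (segs, a.2.1)) ([], (0 : Int))
  PySem.Str.join " " (st.1 ++ [PySem.Str.slice text (some st.2) (some (PySem.Str.len text))])

-- ===== PORT B =====
-- Source B's loop body (the state is (rev, pending, nxt_start); Python's list.append is ++ [·])
def pvBStep (text : String) (keep : List String)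
    (st : List String × Option Int × Option Int) (a : Int × Int × String × String) :
    List String × Option Int × Option Int :=
  if (match st.2.2 with | none => true | some s => decide (a.2.1 ≤ s)) then   -- kept
    let rev := match st.2.1 with
      | none => st.1 ++ [PySem.Str.slice text (some a.2.1) none]
      | some p => if a.2.1 < p then st.1 ++ [PySem.Str.slice text (some a.2.1) (some p)] else st.1
    let rev := if keep.contains a.2.2.1 then
        rev ++ ["<" ++ a.2.2.1 ++ "> " ++ a.2.2.2 ++ " </" ++ a.2.2.1 ++ ">"] else rev
    (rev, some a.1, some a.1)
  else (st.1, st.2.1, some a.1)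

def process_text_with_annotations_alt (text : String) (annotations : List (Int × Int × String × String)) (keep_tag_annotations : List String) : String :=
  let anns := PySem.List.sorted annotations (fun x => x.2.1) false
  let st := anns.reverse.foldl (pvBStep text keep_tag_annotations) ([], none, none)
  let rev := match st.2.1 with
    | none => st.1 ++ [PySem.Str.slice text (some 0) none]
    | some p => if 0 < p then st.1 ++ [PySem.Str.slice text (some 0) (some p)] else st.1
  PySem.Str.join " " rev.reverse

-- ===== PRECONDITION & SPEC =====
def Spec_process_text_with_annotations (text : String) (annotations : List (Int × Int × String × String)) (keep_tag_annotations : List String) (out : String) : Prop := out = process_text_with_annotations_alt text annotations keep_tag_annotations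
instance (text : String) (annotations : List (Int × Int × String × String)) (keep_tag_annotations : List String) (out : String) : Decidable (Spec_process_text_with_annotations text annotations keep_tag_annotations out) := by unfold Spec_process_text_with_annotations; infer_instance

-- ===== CLAIM (what is proved, stated in full; the proofs are below) =====
def Claim_equal_process_text_with_annotations : Prop := ∀ (text : String) (annotations : List (Int × Int × String × String)) (keep_tag_annotations : List String), Dom_process_text_with_annotations text annotations keep_tag_annotations → Spec_process_text_with_annotations text annotations keep_tag_annotations (process_text_with_annotations text annotations keep_tag_annotations)

-- ===== LEMMAS AND PROOFS =====

-- the keep-filter, written as structural recursion (proof-side characterisation)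
def pvChain : List (Int × Int × String × String) → List (Int × Int × String × String)
  | [] => []
  | [a] => [a]
  | a :: b :: r => if a.2.1 ≤ b.1 then a :: pvChain (b :: r) else pvChain (b :: r)

def pvGap (text : String) (index s : Int) : List String :=
  if index < s then [PySem.Str.slice text (some index) (some s)] else []

def pvTag (keep : List String) (a : Int × Int × String × String) : List String :=
  if keep.contains a.2.2.1 then ["<" ++ a.2.2.1 ++ "> " ++ a.2.2.2 ++ " </" ++ a.2.2.1 ++ ">"] else []

-- the segment list both programs produce, as forward structural recursion on the kept list
def pvBuild (text : String) (keep : List String) : List (Int × Int × String × String) → Int → List String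
  | [], index => [PySem.Str.slice text (some index) none]
  | a :: r, index => pvGap text index a.1 ++ pvTag keep a ++ pvBuild text keep r a.2.1

-- A's loop body (proof-side)
def pvStep (text : String) (keep : List String) (st : List String × Int) (a : Int × Int × String × String) : List String × Int :=
  let segs := if st.2 < a.1 then st.1 ++ [PySem.Str.slice text (some st.2) (some a.1)] else st.1
  let segs := if keep.contains a.2.2.1 then
      segs ++ ["<" ++ a.2.2.1 ++ "> " ++ a.2.2.2 ++ " </" ++ a.2.2.1 ++ ">"] else segs
  (segs, a.2.1)

theorem pvNth_nat (xs : List (Int × Int × String × String)) (m : Nat) (h : m < xs.length) :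
    pvNth xs (m : Int) = xs[m] := by
  simp [pvNth, PySem.List.pyGetD_natCast, List.getD_eq_getElem?_getD, List.getElem?_eq_getElem h]

theorem pvChain_sublist (l : List (Int × Int × String × String)) : (pvChain l).Sublist l := by
  induction l with
  | nil => simp [pvChain]
  | cons a rest ih =>
    cases rest with
    | nil => simp [pvChain]
    | cons b r =>
      rw [pvChain]
      split
      · exact ih.cons₂ a
      · exact ih.cons a

theorem pvALoop (xs : List (Int × Int × String × String)) (k : Nat) :
    ∀ (j : Nat) (acc : List (Int × Int × String × String)), xs.length - j = k → 1 ≤ j → j ≤ xs.length →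
    ((PySem.List.pyRange (j : Int) (xs.length : Int) 1).foldl (fun acc i =>
        let a1 := pvNth xs (i - 1)
        let a2 := pvNth xs i
        if a1.2.1 ≤ a2.1 then acc ++ [pvNth xs (i - 1)] else acc) acc)
      ++ [pvNth xs ((xs.length : Int) - 1)]
    = acc ++ pvChain (xs.drop (j - 1)) := by
  induction k with
  | zero =>
    intro j acc hk h1 h2
    have hj : j = xs.length := by omega
    subst hj
    rw [PySem.List.pyRange_one_eq_nil (le_refl _)]
    have hlt : xs.length - 1 < xs.length := by omega
    have hcast : ((xs.length : Int) - 1) = ((xs.length - 1 : Nat) : Int) := by omega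
    rw [List.foldl_nil, hcast, pvNth_nat xs (xs.length - 1) hlt,
        List.drop_eq_getElem_cons hlt]
    have : xs.length - 1 + 1 = xs.length := by omega
    rw [this, List.drop_length]
    simp [pvChain]
  | succ k ih =>
    intro j acc hk h1 h2
    have hjlt : j < xs.length := by omega
    have hcast1 : ((j : Int) - 1) = ((j - 1 : Nat) : Int) := by omega
    have h1lt : j - 1 < xs.length := by omega
    rw [PySem.List.pyRange_one_cons (by exact_mod_cast hjlt), List.foldl_cons]
    have hstep : ((j : Int) + 1) = ((j + 1 : Nat) : Int) := by omega
    rw [hstep]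
    rw [ih (j + 1) _ (by omega) (by omega) (by omega)]
    have hdrop1 : xs.drop (j - 1) = xs[j - 1] :: xs.drop j := by
      have hj1 : j - 1 + 1 = j := by omega
      rw [List.drop_eq_getElem_cons h1lt, hj1]
    have hdrop2 : xs.drop j = xs[j] :: xs.drop (j + 1) := List.drop_eq_getElem_cons hjlt
    simp only [hcast1, pvNth_nat xs (j - 1) h1lt, pvNth_nat xs j hjlt]
    rw [hdrop1, hdrop2, pvChain]
    have : j + 1 - 1 = j := by omega
    rw [this, ← hdrop2]
    split
    · simp
    · simp

theorem remove_eq_chain (l : List (Int × Int × String × String)) :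
    remove_conflicting_annotations l = pvChain (PySem.List.sorted l (fun x => x.2.1) false) := by
  unfold remove_conflicting_annotations
  generalize PySem.List.sorted l (fun x => x.2.1) false = sa
  by_cases h : (sa.length : Int) ≤ 1
  · simp only [h, if_true]
    rcases sa with _ | ⟨a, _ | ⟨b, r⟩⟩
    · simp [pvChain]
    · simp [pvChain]
    · simp at h
      omega
  · simp only [h, if_false]
    have h2 : 1 ≤ sa.length := by omega
    have := pvALoop sa (sa.length - 1) 1 [] (by omega) (by omega) h2
    rw [Nat.cast_one] at this
    simpa using this

-- A's build loop produces pvBuild of the list it iterates over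
theorem pvAfold (text : String) (keep : List String) (c : List (Int × Int × String × String)) :
    ∀ (segs : List String) (index : Int),
    (c.foldl (pvStep text keep) (segs, index)).1
      ++ [PySem.Str.slice text (some (c.foldl (pvStep text keep) (segs, index)).2) none]
    = segs ++ pvBuild text keep c index := by
  induction c with
  | nil => intro segs index; simp [pvBuild]
  | cons a r ih =>
    intro segs index
    rw [List.foldl_cons, pvBuild]
    show ((r.foldl (pvStep text keep) (pvStep text keep (segs, index) a)).1 ++ _) = _
    have hstep : pvStep text keep (segs, index) a
        = (segs ++ pvGap text index a.1 ++ pvTag keep a, a.2.1) := by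
      simp only [pvStep, pvGap, pvTag]
      split <;> split <;> simp
    rw [hstep, ih]
    simp

theorem pvChain_ne_nil (a : Int × Int × String × String) (r : List (Int × Int × String × String)) :
    pvChain (a :: r) ≠ [] := by
  induction r generalizing a with
  | nil => simp [pvChain]
  | cons b r ih =>
    rw [pvChain]
    split
    · simp
    · exact ih b

-- invariant of B's right-to-left pass (stated over foldr; the port's reverse-foldl is converted below)
theorem pvBInv (text : String) (keep : List String) (c : List (Int × Int × String × String)) :
    (c.foldr (fun a st => pvBStep text keep st a) ([], none, none)).2.2 = (c.head?).map (·.1) ∧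
    ((pvChain c = [] ∧ (c.foldr (fun a st => pvBStep text keep st a) ([], none, none)).2.1 = none
        ∧ (c.foldr (fun a st => pvBStep text keep st a) ([], none, none)).1 = []) ∨
     (∃ a k', pvChain c = a :: k'
        ∧ (c.foldr (fun a st => pvBStep text keep st a) ([], none, none)).2.1 = some a.1
        ∧ ∀ index, pvGap text index a.1
            ++ (c.foldr (fun a st => pvBStep text keep st a) ([], none, none)).1.reverse
          = pvBuild text keep (pvChain c) index)) := by
  induction c with
  | nil => exact ⟨rfl, Or.inl ⟨rfl, rfl, rfl⟩⟩
  | cons a c' ih =>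
    obtain ⟨hnxt, hrest⟩ := ih
    rw [List.foldr_cons]
    cases c' with
    | nil =>
      refine ⟨by simp [pvBStep], Or.inr ⟨a, [], by simp [pvChain], by simp [pvBStep], ?_⟩⟩
      intro index
      simp [pvBStep, pvBuild, pvTag, pvChain]
      split <;> simp
    | cons b r =>
      simp only [List.head?_cons, Option.map_some] at hnxt
      generalize hst : List.foldr (fun a st => pvBStep text keep st a) ([], none, none) (b :: r) = st' at hnxt hrest ⊢
      obtain ⟨rev', pending', nxt'⟩ := st'
      dsimp only at hnxt
      subst hnxt
      rcases hrest with ⟨hch, -, -⟩ | ⟨x, k', hch, hpend, hbuild⟩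
      · exact absurd hch (pvChain_ne_nil b r)
      · dsimp only at hpend hbuild
        subst hpend
        by_cases hc : a.2.1 ≤ b.1
        · -- kept
          have hstep : pvBStep text keep (rev', some x.1, some b.1) a
              = ((rev' ++ pvGap text a.2.1 x.1) ++ pvTag keep a, some a.1, some a.1) := by
            simp only [pvBStep, pvGap, pvTag, hc, decide_true]
            split_ifs <;> simp
          rw [hstep]
          refine ⟨rfl, Or.inr ⟨a, pvChain (b :: r), by rw [pvChain, if_pos hc], rfl, ?_⟩⟩
          intro index
          rw [pvChain, if_pos hc, pvBuild, ← hbuild a.2.1]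
          simp only [List.reverse_append, List.append_assoc, pvGap, pvTag]
          split_ifs <;> simp
        · -- dropped
          have hstep : pvBStep text keep (rev', some x.1, some b.1) a
              = (rev', some x.1, some a.1) := by
            simp only [pvBStep, hc, decide_false]
            simp
          rw [hstep]
          refine ⟨rfl, Or.inr ⟨x, k', by rw [pvChain, if_neg hc, hch], rfl, ?_⟩⟩
          intro index
          rw [pvChain, if_neg hc]
          exact hbuild index

theorem slice_len_eq_none (s : String) (a : Int) :
    PySem.Str.slice s (some a) (some (PySem.Str.len s)) = PySem.Str.slice s (some a) none := by
  simp [PySem.Str.slice, PySem.List.slice, PySem.Str.len]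

-- B's whole computation on a list c equals joining pvBuild (pvChain c) 0
theorem pvB_eq_build (text : String) (keep : List String) (c : List (Int × Int × String × String)) :
    (let st := c.reverse.foldl (pvBStep text keep) ([], none, none)
     let rev := match st.2.1 with
       | none => st.1 ++ [PySem.Str.slice text (some 0) none]
       | some p => if 0 < p then st.1 ++ [PySem.Str.slice text (some 0) (some p)] else st.1
     rev.reverse) = pvBuild text keep (pvChain c) 0 := by
  rw [List.foldl_reverse]
  obtain ⟨-, hrest⟩ := pvBInv text keep c
  rcases hrest with ⟨hch, hpend, hrev⟩ | ⟨a, k', hch, hpend, hbuild⟩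
  · simp only [hpend, hch, hrev]
    simp [pvBuild]
  · simp only [hpend]
    have h := hbuild 0
    split
    · rename_i hp
      rw [pvGap, if_pos hp] at h
      simpa using h
    · rename_i hp
      rw [pvGap, if_neg hp] at h
      simpa using h

-- ===== VERDICT (by name: the statement is the Claim_ definition above) =====
theorem process_text_with_annotations_spec : Claim_equal_process_text_with_annotations := by
  intro text anns keep _
  unfold Spec_process_text_with_annotations
  unfold process_text_with_annotations process_text_with_annotations_alt
  dsimp only
  rw [remove_eq_chain]
  have hpw : (pvChain (PySem.List.sorted anns (fun x => x.2.1) false)).Pairwise (fun a b => a.2.1 ≤ b.2.1) :=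
    List.Pairwise.sublist (pvChain_sublist _) (PySem.List.sorted_pairwise anns _)
  generalize hgen : PySem.List.sorted anns (fun x => x.2.1) false = sa
  rw [hgen] at hpw
  rw [PySem.List.sorted_eq_self_of_pairwise _ _ hpw]
  rw [show ((PySem.List.pyRange 0 ((pvChain sa).length : Int) 1).foldl (fun (st : List String × Int) i =>
      let a := pvNth (pvChain sa) i
      let segs := if st.2 < a.1 then st.1 ++ [PySem.Str.slice text (some st.2) (some a.1)] else st.1
      let segs := if keep.contains a.2.2.1 then
          segs ++ ["<" ++ a.2.2.1 ++ "> " ++ a.2.2.2 ++ " </" ++ a.2.2.1 ++ ">"] else segs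
      (segs, a.2.1)) ([], (0 : Int))) = (pvChain sa).foldl (pvStep text keep) ([], 0)
    from PySem.List.foldl_pyRange_zero_pyGetD' (pvChain sa) (0, 0, "", "") (pvStep text keep) ([], 0)]
  rw [slice_len_eq_none, pvAfold, pvB_eq_build]
  simp
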